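-- pv_equiv track=rewrite | github.com/soras/vk_ner_lrec_2022 | data_preprocessing.py | get_used_labels_mapping
-- ===== SOURCE A (Python) =====
-- def get_used_labels_mapping( labels_for_sents, remove_underscore=False ):
--     '''
--     Get all labels used in the dataset. Create mappings from labels to
--     their numeric indexes.
--     Returns tuple (tag2idx, idx2tag, tag_values):
--     * `tag2idx` - dictionary mapping from NE tag names to numeric tag indexes;
--     * `idx2tag` - dictionary mapping from numeric tag indexes to NE tag names;
--     * `tag_values` - list of all NE tag names;
--     '''
--     labels = []
--     for sent in labels_for_sents:
--         for label in sent: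
--             assert isinstance( label, str )
--             if remove_underscore:
--                 label = label.replace('_', '')
--             if label not in labels:
--                 labels.append( label )
--     labels = sorted( labels )
--     labels.append("PAD")
--     tag2idx = {t: i for i, t in enumerate(labels)}
--     idx2tag = {i: t for i, t in enumerate(labels)}
--     return tag2idx, idx2tag, labels
-- ===== SOURCE B (Python) =====
-- def _clean(label, remove_underscore):
--     assert isinstance(label, str)
--     return label.replace('_', '') if remove_underscore else label
--
--
-- def get_used_labels_mapping(labels_for_sents, remove_underscore=False):
--     '''
--     Get all labels used in the dataset. Create mappings from labels to
--     their numeric indexes.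
--     Returns tuple (tag2idx, idx2tag, tag_values):
--     * `tag2idx` - dictionary mapping from NE tag names to numeric tag indexes;
--     * `idx2tag` - dictionary mapping from numeric tag indexes to NE tag names;
--     * `tag_values` - list of all NE tag names;
--     '''
--     # Sort every occurrence (duplicates included), then keep one copy of each
--     # run by comparing with the last kept element; mappings come from zip.
--     flat = sorted(_clean(l, remove_underscore)
--                   for sent in labels_for_sents for l in sent)
--     labels = []
--     for x in flat:
--         if not labels or labels[-1] != x:
--             labels.append(x)
--     labels.append("PAD")
--     idx = range(len(labels))
--     tag2idx = dict(zip(labels, idx))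
--     idx2tag = dict(zip(idx, labels))
--     return tag2idx, idx2tag, labels
-- ===== Notes on version B (the rewrite author's own statement) =====
-- stated objective: faster
-- what changed: A dedups with an in-loop 'label not in labels' membership scan over a growing unique list and builds both dicts by enumerate-comprehensions; B sorts the full multiset of occurrences once, keeps one copy per run by comparing with the last kept element, and builds tag2idx/idx2tag as dict(zip(...)) with a range.
import Mathlib
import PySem

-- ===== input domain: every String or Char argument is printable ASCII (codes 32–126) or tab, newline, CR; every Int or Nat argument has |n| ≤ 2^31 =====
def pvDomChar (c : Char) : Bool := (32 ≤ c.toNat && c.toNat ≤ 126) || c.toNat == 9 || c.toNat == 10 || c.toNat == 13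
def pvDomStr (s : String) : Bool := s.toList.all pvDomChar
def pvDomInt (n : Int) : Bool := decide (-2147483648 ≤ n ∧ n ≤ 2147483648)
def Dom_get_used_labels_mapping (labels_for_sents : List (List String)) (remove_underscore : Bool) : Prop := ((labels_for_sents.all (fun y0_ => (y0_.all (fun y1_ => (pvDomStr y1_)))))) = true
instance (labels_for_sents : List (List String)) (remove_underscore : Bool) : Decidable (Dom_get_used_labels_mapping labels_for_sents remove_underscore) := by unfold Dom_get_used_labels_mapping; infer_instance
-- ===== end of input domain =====

-- B replaces A's quadratic in-loop membership dedup by sort-all-occurrences-then-adjacent-dedup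
-- (comparing with the last kept element), and builds the two dicts from zips instead of
-- enumerate comprehensions. Both are total on well-typed input (the 'assert isinstance(label, str)'
-- always passes under the type convention).

-- ===== PORT A =====
def get_used_labels_mapping (labels_for_sents : List (List String)) (remove_underscore : Bool) : (List (String × Int)) × (List (Int × String)) × List String :=
  -- labels = []; for sent in ...: for label in sent: (replace); if label not in labels: labels.append(label)
  let labels0 := labels_for_sents.foldl (fun labels sent =>
    sent.foldl (fun labels label =>
      let label := if remove_underscore then PySem.Str.replace label "_" "" else label
      if labels.contains label then labels else labels ++ [label]) labels) []
  let labels := PySem.List.sorted labels0 (fun x => x) false ++ ["PAD"]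
  let tag2idx := (PySem.List.enumerate labels 0).foldl (fun d p => d.insert p.2 p.1) PySem.Dict.empty
  let idx2tag := (PySem.List.enumerate labels 0).foldl (fun d p => d.insert p.1 p.2) PySem.Dict.empty
  (tag2idx.items, idx2tag.items, labels)

-- ===== PORT B =====
-- _clean(label, remove_underscore): the assert always passes on String input
def pvClean (label : String) (remove_underscore : Bool) : String :=
  if remove_underscore then PySem.Str.replace label "_" "" else label

def get_used_labels_mapping_alt (labels_for_sents : List (List String)) (remove_underscore : Bool) : (List (String × Int)) × (List (Int × String)) × List String :=
  -- flat = sorted(_clean(l, remove_underscore) for sent in labels_for_sents for l in sent)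
  let flat := PySem.List.sorted (labels_for_sents.flatMap (fun sent => sent.map (fun l => pvClean l remove_underscore))) (fun x => x) false
  -- for x in flat: if not labels or labels[-1] != x: labels.append(x)
  let labels := flat.foldl (fun labels x =>
      if labels == ([] : List String) || !(PySem.List.pyGet? labels (-1) == some x)
      then labels ++ [x] else labels) []
  let labels := labels ++ ["PAD"]
  let idx := PySem.List.pyRange 0 labels.length 1
  let tag2idx := PySem.Dict.ofList (labels.zip idx)
  let idx2tag := PySem.Dict.ofList (idx.zip labels)
  (tag2idx.items, idx2tag.items, labels)

-- ===== PRECONDITION & SPEC =====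
def Spec_get_used_labels_mapping (labels_for_sents : List (List String)) (remove_underscore : Bool) (out : (List (String × Int)) × (List (Int × String)) × List String) : Prop := out = get_used_labels_mapping_alt labels_for_sents remove_underscore
instance (labels_for_sents : List (List String)) (remove_underscore : Bool) (out : (List (String × Int)) × (List (Int × String)) × List String) : Decidable (Spec_get_used_labels_mapping labels_for_sents remove_underscore out) := by unfold Spec_get_used_labels_mapping; infer_instance

-- ===== CLAIM (what is proved, stated in full; the proofs are below) =====
def Claim_equal_get_used_labels_mapping : Prop := ∀ (labels_for_sents : List (List String)) (remove_underscore : Bool), Dom_get_used_labels_mapping labels_for_sents remove_underscore → Spec_get_used_labels_mapping labels_for_sents remove_underscore (get_used_labels_mapping labels_for_sents remove_underscore)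

-- ===== LEMMAS AND PROOFS =====

-- Adjacent dedup of B's loop, as a structural recursion (proof-side helper):
-- prev = the last kept element (none while nothing is kept yet).
def ddAux : Option String → List String → List String
  | _, [] => []
  | prev, x :: xs => if prev ≠ some x then x :: ddAux (some x) xs else ddAux prev xs

lemma pyGet_neg_one_getLast (xs : List String) (h : xs ≠ []) :
    PySem.List.pyGet? xs (-1) = xs.getLast? := by
  have h1 : 1 ≤ xs.length := List.length_pos_iff.mpr h
  simp [PySem.List.pyGet?, PySem.List.pyIdx?, h1, List.getLast?_eq_getElem?]

-- B's fold with accumulator acc behaves like ddAux driven by acc's last element.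
lemma foldB_dd (l : List String) : ∀ (acc : List String),
    l.foldl (fun labels x =>
      if labels == ([] : List String) || !(PySem.List.pyGet? labels (-1) == some x)
      then labels ++ [x] else labels) acc
    = acc ++ ddAux acc.getLast? l := by
  induction l with
  | nil => intro acc; simp [ddAux]
  | cons x xs ih =>
    intro acc
    simp only [List.foldl_cons]
    have hcond : (acc == ([] : List String) || !(PySem.List.pyGet? acc (-1) == some x))
        = decide (acc.getLast? ≠ some x) := by
      by_cases hacc : acc = []
      · subst hacc; simp
      · have hg := pyGet_neg_one_getLast acc hacc
        rw [hg]
        by_cases hx : acc.getLast? = some x <;> simp [hx, hacc]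
    rw [hcond]
    by_cases hx : acc.getLast? ≠ some x
    · rw [if_pos (by simpa using hx), ih (acc ++ [x])]
      simp [ddAux, hx]
    · rw [if_neg (by simpa using hx), ih acc]
      rw [not_not] at hx
      simp [ddAux, hx]

def ddPrev : Option String → List String → Option String
  | prev, [] => prev
  | prev, x :: xs => if prev ≠ some x then ddPrev (some x) xs else ddPrev prev xs

lemma dd_some_spec : ∀ (l : List String) (p : String), l.Pairwise (· ≤ ·) → (∀ x ∈ l, p ≤ x) →
    (∀ y, y ∈ ddAux (some p) l ↔ (y ∈ l ∧ y ≠ p)) ∧ (ddAux (some p) l).Pairwise (· < ·) ∧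
    (∀ y ∈ ddAux (some p) l, p < y) := by
  intro l
  induction l with
  | nil => intro p _ _; simp [ddAux]
  | cons x xs ih =>
    intro p hpw hge
    have hx : p ≤ x := hge x (by simp)
    have hxs : ∀ y ∈ xs, x ≤ y := fun y hy => List.rel_of_pairwise_cons hpw hy
    have hpw' : xs.Pairwise (· ≤ ·) := hpw.of_cons
    by_cases hxp : x = p
    · subst hxp
      have hspec := ih x hpw' hxs
      have hdd : ddAux (some x) (x :: xs) = ddAux (some x) xs := by simp [ddAux]
      rw [hdd]
      refine ⟨fun y => ?_, hspec.2.1, hspec.2.2⟩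
      rw [hspec.1 y, List.mem_cons]
      constructor
      · rintro ⟨hy, hne⟩; exact ⟨Or.inr hy, hne⟩
      · rintro ⟨(hy | hy), hne⟩
        · exact absurd hy hne
        · exact ⟨hy, hne⟩
    · have hplt : p < x := lt_of_le_of_ne hx (fun h => hxp h.symm)
      have hcond : (some p : Option String) ≠ some x := by
        intro h; exact hxp (Option.some.inj h).symm
      have hspec := ih x hpw' hxs
      have hdd : ddAux (some p) (x :: xs) = x :: ddAux (some x) xs := by simp [ddAux, hcond]
      rw [hdd]
      refine ⟨fun y => ?_, ?_, ?_⟩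
      · simp only [List.mem_cons, hspec.1 y]
        constructor
        · rintro (rfl | ⟨hy, _⟩)
          · exact ⟨Or.inl rfl, fun hh => hxp hh⟩
          · exact ⟨Or.inr hy, fun hh => (not_le_of_gt hplt) (hh ▸ hxs y hy)⟩
        · rintro ⟨(rfl | hy), hne⟩
          · exact Or.inl rfl
          · by_cases hyx : y = x
            · exact Or.inl hyx
            · exact Or.inr ⟨hy, hyx⟩
      · exact List.Pairwise.cons (fun y hy => hspec.2.2 y hy) hspec.2.1
      · intro y hy
        rcases List.mem_cons.mp hy with rfl | hy
        · exact hplt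
        · exact lt_trans hplt (hspec.2.2 y hy)

lemma dd_none_spec (l : List String) (h : l.Pairwise (· ≤ ·)) :
    (∀ y, y ∈ ddAux none l ↔ y ∈ l) ∧ (ddAux none l).Pairwise (· < ·) := by
  cases l with
  | nil => simp [ddAux]
  | cons x xs =>
    have hxs : ∀ y ∈ xs, x ≤ y := fun y hy => List.rel_of_pairwise_cons h hy
    have hspec := dd_some_spec xs x h.of_cons hxs
    have hdd : ddAux none (x :: xs) = x :: ddAux (some x) xs := by simp [ddAux]
    rw [hdd]
    constructor
    · intro y
      simp only [List.mem_cons, hspec.1 y]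
      constructor
      · rintro (rfl | ⟨hy, _⟩)
        · exact Or.inl rfl
        · exact Or.inr hy
      · rintro (rfl | hy)
        · exact Or.inl rfl
        · by_cases hyx : y = x
          · exact Or.inl hyx
          · exact Or.inr ⟨hy, hyx⟩
    · exact List.Pairwise.cons (fun y hy => hspec.2.2 y hy) hspec.2.1

-- the two label lists agree for any multiset F of (transformed) occurrences
lemma labels_eq (F : List String) :
    PySem.List.sorted (PySem.Set.ofList F) (fun x => x) false
      = ddAux none (PySem.List.sorted F (fun x => x) false) := by
  have hpw : (PySem.List.sorted F (fun x => x) false).Pairwise (· ≤ ·) :=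
    PySem.List.sorted_pairwise F (fun x => x)
  have hdd := dd_none_spec _ hpw
  apply PySem.List.sorted_eq_of_perm_of_pairwise_lt
  · have hnd1 : (ddAux none (PySem.List.sorted F (fun x => x) false)).Nodup :=
      hdd.2.imp ne_of_lt
    have hnd2 : (PySem.Set.ofList F).Nodup := PySem.Set.nodup_ofList F
    rw [List.perm_ext_iff_of_nodup hnd1 hnd2]
    intro y
    rw [hdd.1 y, PySem.List.mem_sorted, PySem.Set.mem_ofList]
  · exact hdd.2

-- enumerate(xs, s) is the zip of range(s, s+len(xs)) with xs
lemma enum_eq_zip (xs : List String) : ∀ (s : Int),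
    PySem.List.enumerate xs s = (PySem.List.pyRange s (s + xs.length) 1).zip xs := by
  induction xs with
  | nil => intro s; simp [PySem.List.enumerate_nil, PySem.List.pyRange_one_eq_nil]
  | cons x xs ih =>
    intro s
    have hlt : s < s + ((x :: xs).length : Int) := by simp
    have harg : s + (((x :: xs).length : Nat) : Int) = (s + 1) + (xs.length : Int) := by
      rw [List.length_cons]; push_cast; ring
    rw [PySem.List.enumerate_cons, PySem.List.pyRange_one_cons hlt, harg, List.zip_cons_cons,
      ih (s + 1)]

-- enumerate(labels) is range(len(labels)) zipped with labels
lemma enum_zero_zip (labels : List String) :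
    PySem.List.enumerate labels 0 = (PySem.List.pyRange 0 (labels.length) 1).zip labels := by
  rw [enum_eq_zip]; norm_num

-- dict(zip(labels, idx)) = A's {t: i for i, t in enumerate(labels)} fold
lemma dict_tag2idx (labels : List String) :
    (PySem.List.enumerate labels 0).foldl (fun d p => d.insert p.2 p.1) PySem.Dict.empty
      = PySem.Dict.ofList (labels.zip (PySem.List.pyRange 0 (labels.length) 1)) := by
  have hz : labels.zip (PySem.List.pyRange 0 (labels.length) 1)
      = (PySem.List.enumerate labels 0).map Prod.swap := by
    rw [enum_zero_zip, List.zip_swap]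
  rw [PySem.Dict.ofList, PySem.Dict.update, hz, List.foldl_map]
  rfl

-- dict(zip(idx, labels)) = A's {i: t for i, t in enumerate(labels)} fold
lemma dict_idx2tag (labels : List String) :
    (PySem.List.enumerate labels 0).foldl (fun d p => d.insert p.1 p.2) PySem.Dict.empty
      = PySem.Dict.ofList ((PySem.List.pyRange 0 (labels.length) 1).zip labels) := by
  rw [PySem.Dict.ofList, PySem.Dict.update, ← enum_zero_zip]

theorem get_used_labels_mapping_eq (labels_for_sents : List (List String)) (remove_underscore : Bool) :
    get_used_labels_mapping labels_for_sents remove_underscore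
      = get_used_labels_mapping_alt labels_for_sents remove_underscore := by
  unfold get_used_labels_mapping get_used_labels_mapping_alt
  -- A's dedup loop over the nested structure = Set.ofList of the transformed flat list
  have hA : labels_for_sents.foldl (fun labels sent =>
      sent.foldl (fun labels label =>
        let label := if remove_underscore then PySem.Str.replace label "_" "" else label
        if labels.contains label then labels else labels ++ [label]) labels) []
      = PySem.Set.ofList (labels_for_sents.flatMap (fun sent => sent.map (fun l => pvClean l remove_underscore))) := by
    rw [List.flatMap_def, ← List.map_flatten, ← List.foldl_flatten,
      PySem.Set.ofList_eq_foldl, List.foldl_map]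
    apply PySem.List.foldl_congr_mem
    intro acc x _
    rfl
  simp only [hA, foldB_dd, List.nil_append, List.getLast?_nil, ← labels_eq,
    dict_tag2idx, dict_idx2tag]

-- ===== VERDICT (by name: the statement is the Claim_ definition above) =====
theorem get_used_labels_mapping_spec : Claim_equal_get_used_labels_mapping := by
  intro labels_for_sents remove_underscore _
  exact get_used_labels_mapping_eq labels_for_sents remove_underscore
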